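-- pv_equiv track=rewrite | github.com/kupl/erc-group2-framework | util.py | parse_dict_depth
-- ===== SOURCE A (Python) =====
-- def parse_dict_depth(typ, depth=1) :
--     paren = 0
--     for i, c in enumerate(typ) :
--         if c == '[' :
--             paren += 1
--
--         if c == ']' :
--             paren -= 1
--
--         if c == '=' and depth == paren :
--             return i
-- ===== SOURCE B (Python) =====
-- def parse_dict_depth(typ, depth=1):
--     # Two-pass decomposition: first build the inclusive prefix bracket-depth
--     # table, then search it for the first '=' at the requested depth.
--     depths = []
--     d = 0
--     for c in typ:
--         d += (c == '[') - (c == ']')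
--         depths.append(d)
--     for i, c in enumerate(typ):
--         if c == '=' and depths[i] == depth:
--             return i
--     return None
-- ===== Notes on version B (the rewrite author's own statement) =====
-- stated objective: alternative
-- what changed: B separates the work into two passes: it first materialises a prefix bracket-depth table over the whole string, then searches that table for the first equals sign at the requested depth, instead of A's single interleaved loop mutating a counter while scanning.
import Mathlib
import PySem

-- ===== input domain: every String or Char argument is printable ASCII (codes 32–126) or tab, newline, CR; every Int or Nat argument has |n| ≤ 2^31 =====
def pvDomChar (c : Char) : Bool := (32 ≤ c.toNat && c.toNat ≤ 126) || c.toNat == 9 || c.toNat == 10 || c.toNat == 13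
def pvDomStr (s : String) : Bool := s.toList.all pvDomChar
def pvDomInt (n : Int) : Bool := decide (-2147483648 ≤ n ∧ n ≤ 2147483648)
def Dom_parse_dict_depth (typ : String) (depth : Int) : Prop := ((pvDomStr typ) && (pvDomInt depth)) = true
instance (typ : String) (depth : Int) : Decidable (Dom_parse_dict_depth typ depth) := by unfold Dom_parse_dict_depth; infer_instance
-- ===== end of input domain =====

-- B replaces A's single interleaved counting loop by a two-pass decomposition
-- (build a prefix bracket-depth table, then search it); same cost, alternative structure.


-- ===== PORT A =====
-- A's loop: running counter `paren`, updated before each '=' test, early return of the index.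
def pvAGo (cs : List Char) (i : Int) (paren : Int) (depth : Int) : Option Int :=
  match cs with
  | [] => none
  | c :: rest =>
    let paren1 := if c = '[' then paren + 1 else paren
    let paren2 := if c = ']' then paren1 - 1 else paren1
    if c = '=' ∧ depth = paren2 then some i
    else pvAGo rest (i + 1) paren2 depth

def parse_dict_depth (typ : String) (depth : Int) : Option Int :=
  pvAGo typ.toList 0 0 depth

-- ===== PORT B =====
-- pass 1 of Source B: the inclusive prefix bracket-depth table
def pvDepths (cs : List Char) (d : Int) : List Int :=
  match cs with
  | [] => []
  | c :: rest =>
    let d' := d + ((if c = '[' then (1 : Int) else 0) - (if c = ']' then (1 : Int) else 0))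
    d' :: pvDepths rest d'

-- pass 2 of Source B: enumerate and look up depths[i] (walked in step with the chars)
def pvSearch (cs : List Char) (ds : List Int) (i : Int) (depth : Int) : Option Int :=
  match cs, ds with
  | c :: rest, d :: drest =>
    if c = '=' ∧ d = depth then some i else pvSearch rest drest (i + 1) depth
  | _, _ => none

def parse_dict_depth_alt (typ : String) (depth : Int) : Option Int :=
  pvSearch typ.toList (pvDepths typ.toList 0) 0 depth

-- ===== PRECONDITION & SPEC =====
def Spec_parse_dict_depth (typ : String) (depth : Int) (out : Option Int) : Prop := out = parse_dict_depth_alt typ depth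
instance (typ : String) (depth : Int) (out : Option Int) : Decidable (Spec_parse_dict_depth typ depth out) := by unfold Spec_parse_dict_depth; infer_instance

-- ===== CLAIM (what is proved, stated in full; the proofs are below) =====
def Claim_equal_parse_dict_depth : Prop := ∀ (typ : String) (depth : Int), Dom_parse_dict_depth typ depth → Spec_parse_dict_depth typ depth (parse_dict_depth typ depth)

-- ===== LEMMAS AND PROOFS =====

theorem pvGo_eq (cs : List Char) (i paren depth : Int) :
    pvAGo cs i paren depth = pvSearch cs (pvDepths cs paren) i depth := by
  induction cs generalizing i paren with
  | nil => rfl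
  | cons c rest ih =>
    simp only [pvAGo, pvDepths, pvSearch]
    have h2 : (if c = ']' then (if c = '[' then paren + 1 else paren) - 1
               else (if c = '[' then paren + 1 else paren))
            = paren + ((if c = '[' then (1 : Int) else 0) - (if c = ']' then (1 : Int) else 0)) := by
      by_cases h1 : c = '['
      · subst h1; simp
      · by_cases h3 : c = ']' <;> simp [h1, h3] <;> ring
    rw [h2]
    by_cases hc : c = '=' ∧ depth = paren + ((if c = '[' then (1 : Int) else 0) - (if c = ']' then (1 : Int) else 0))
    · simp [hc]
    · have : ¬ (c = '=' ∧ paren + ((if c = '[' then (1 : Int) else 0) - (if c = ']' then (1 : Int) else 0)) = depth) := by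
        intro ⟨h, h'⟩; exact hc ⟨h, h'.symm⟩
      simp only [if_neg hc, if_neg this]
      exact ih i.succ _

-- ===== VERDICT (by name: the statement is the Claim_ definition above) =====
theorem parse_dict_depth_spec : Claim_equal_parse_dict_depth := by
  intro typ depth _
  unfold Spec_parse_dict_depth parse_dict_depth parse_dict_depth_alt
  exact pvGo_eq _ _ _ _
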